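-- pv_equiv track=rewrite | github.com/Fru1t2/Fru1t | 프로그래머스/2/250136. ［PCCP 기출문제］ 2번 ／ 석유 시추/［PCCP 기출문제］ 2번 ／ 석유 시추.py | bfs
-- ===== SOURCE A (Python) =====
-- from collections import deque
--
-- def bfs(land, visited, i, j):
--     rows = len(land)
--     cols = len(land[0])
--
--     # 방향 벡터: 하, 좌, 우
--     directions = [(1, 0), (0, -1), (0, 1), (-1, 0)]
--
--     queue = deque([(i, j)])
--     size = 0
--     min_col = j
--     max_col = j
--
--     while queue:
--         x, y = queue.popleft()
--
--         if not (0 <= x < rows and 0 <= y < cols):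
--             continue
--
--         if visited[x][y] or land[x][y] == 0:
--             continue
--
--         visited[x][y] = True
--         size += 1
--         min_col = min(min_col, y)
--         max_col = max(max_col, y)
--
--         for dx, dy in directions:
--             nx, ny = x + dx, y + dy
--             queue.append((nx, ny))
--
--     return size, min_col, max_col
-- ===== SOURCE B (Python) =====
-- def bfs(land, visited, i, j):
--     # Iterative DFS flood fill: validity is checked before a cell is pushed and it is
--     # marked visited at push time, so the stack only ever holds distinct component cells
--     # (A's BFS defers the check to pop time and may enqueue duplicates).
--     # Mutates `visited` exactly like A: the same set of cells ends up marked.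
--     rows = len(land)
--     cols = len(land[0])
--
--     def ok(x, y):
--         return 0 <= x < rows and 0 <= y < cols and not visited[x][y] and land[x][y] != 0
--
--     if not ok(i, j):
--         return 0, j, j
--     visited[i][j] = True
--     stack = [(i, j)]
--     size = 0
--     min_col = j
--     max_col = j
--     while stack:
--         x, y = stack.pop()
--         size += 1
--         min_col = min(min_col, y)
--         max_col = max(max_col, y)
--         for nx, ny in ((x + 1, y), (x, y - 1), (x, y + 1), (x - 1, y)):
--             if ok(nx, ny):
--                 visited[nx][ny] = True
--                 stack.append((nx, ny))
--     return size, min_col, max_col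
-- ===== Notes on version B (the rewrite author's own statement) =====
-- stated objective: alternative
-- what changed: A's check-on-pop BFS over a deque (cells are enqueued unvalidated, possibly duplicated, and bounds/visited/oil-checked only when dequeued) is replaced by a mark-on-push iterative DFS over a stack: validity is checked before pushing, the cell is marked visited at push time, so the stack only ever holds distinct component cells and the accounting happens at pop.
-- outside the precondition, e.g. on bfs([[1, 0], [0]], [[False, False], [False, False]], 0, 0): A returns (1, 0, 0), B returns (1, 0, 0)
import Mathlib
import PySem

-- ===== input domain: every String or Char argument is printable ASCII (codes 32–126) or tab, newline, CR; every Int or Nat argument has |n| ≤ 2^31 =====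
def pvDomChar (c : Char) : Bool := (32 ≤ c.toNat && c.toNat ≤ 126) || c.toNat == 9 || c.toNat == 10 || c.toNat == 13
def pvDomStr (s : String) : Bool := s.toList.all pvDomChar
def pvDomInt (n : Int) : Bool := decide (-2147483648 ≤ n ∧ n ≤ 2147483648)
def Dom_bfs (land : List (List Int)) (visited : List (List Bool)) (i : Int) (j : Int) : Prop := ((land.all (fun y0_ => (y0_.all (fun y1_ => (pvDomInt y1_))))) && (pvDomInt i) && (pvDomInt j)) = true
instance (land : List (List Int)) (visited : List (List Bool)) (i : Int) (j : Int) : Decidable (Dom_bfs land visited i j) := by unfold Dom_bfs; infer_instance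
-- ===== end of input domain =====

-- B replaces A's check-on-pop BFS deque flood fill by a mark-on-push DFS stack flood fill
-- (alternative decomposition, same cost); both Pythons mutate `visited` identically, and
-- the equivalence proved here is about the RETURN value.

-- ===== PORT A =====
-- Python subscripts visited[x][y] / land[x][y]; both programs evaluate them only under the
-- guard 0 ≤ x,y, where Int.toNat is exact (no negative-index wraparound can be observed).
def pvVget (v : List (List Bool)) (x y : Int) : Bool := (v.getD x.toNat []).getD y.toNat false
def pvLget (land : List (List Int)) (x y : Int) : Int := (land.getD x.toNat []).getD y.toNat 0
-- visited[x][y] = True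
def pvMark (v : List (List Bool)) (x y : Int) : List (List Bool) :=
  v.modify x.toNat (fun row => row.set y.toNat true)

-- A's while-loop over the deque; `fuel` only makes the recursion structural: a run pops at
-- most 1 + 4·rows·cols cells (each mark enqueues 4, each cell is marked at most once), so
-- the fuel provided by `bfs` is never exhausted.
def bfsLoop (land : List (List Int)) (rows cols : Int) (fuel : Nat) (visited : List (List Bool))
    (queue : List (Int × Int)) (size min_col max_col : Int) : Int × Int × Int :=
  match fuel, queue with
  | 0, _ => (size, min_col, max_col)
  | _+1, [] => (size, min_col, max_col)
  | t+1, (x, y) :: rest =>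
    if ¬(0 ≤ x ∧ x < rows ∧ 0 ≤ y ∧ y < cols) then
      bfsLoop land rows cols t visited rest size min_col max_col
    else if pvVget visited x y || pvLget land x y == 0 then
      bfsLoop land rows cols t visited rest size min_col max_col
    else
      bfsLoop land rows cols t (pvMark visited x y)
        (rest ++ [(x+1, y), (x, y-1), (x, y+1), (x-1, y)])
        (size+1) (min min_col y) (max max_col y)

def bfs (land : List (List Int)) (visited : List (List Bool)) (i : Int) (j : Int) : Int × Int × Int :=
  bfsLoop land (land.length : Int) ((land.headD []).length : Int)
    (4 * (land.length * (land.headD []).length) + 1) visited [(i, j)] 0 j j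

-- ===== PORT B =====
-- Source B's local helper `ok(x, y)`
def okB (land : List (List Int)) (rows cols : Int) (v : List (List Bool)) (x y : Int) : Bool :=
  decide (0 ≤ x ∧ x < rows ∧ 0 ≤ y ∧ y < cols) && !pvVget v x y && (pvLget land x y != 0)

-- Source B's while-loop: pop the top of the stack (head here = Python's list end), account it,
-- and push every ok neighbour after marking it.  fuel (pops = component size ≤ rows·cols)
-- only makes the recursion structural and is never exhausted.
def dfsLoop (land : List (List Int)) (rows cols : Int) (fuel : Nat) (visited : List (List Bool))
    (stack : List (Int × Int)) (size min_col max_col : Int) : Int × Int × Int :=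
  match fuel, stack with
  | 0, _ => (size, min_col, max_col)
  | _+1, [] => (size, min_col, max_col)
  | t+1, (x, y) :: rest =>
    let vs := [(x+1, y), (x, y-1), (x, y+1), (x-1, y)].foldl
      (fun (s : List (List Bool) × List (Int × Int)) n =>
        if okB land rows cols s.1 n.1 n.2 then (pvMark s.1 n.1 n.2, n :: s.2) else s)
      (visited, rest)
    dfsLoop land rows cols t vs.1 vs.2 (size+1) (min min_col y) (max max_col y)

def bfs_alt (land : List (List Int)) (visited : List (List Bool)) (i : Int) (j : Int) : Int × Int × Int :=
  if okB land (land.length : Int) ((land.headD []).length : Int) visited i j then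
    dfsLoop land (land.length : Int) ((land.headD []).length : Int)
      (land.length * (land.headD []).length + 1) (pvMark visited i j) [(i, j)] 0 j j
  else (0, j, j)

-- ===== PRECONDITION & SPEC =====
-- A raises IndexError on land = [] and on ragged grids whose missing cells the flood
-- actually reaches; whether a ragged grid raises depends on which cells are reached, which
-- is not closed-form, so Pre_ keeps the closed-form safe cases: start out of bounds, start
-- safely skipped at a present cell, or a grid rectangular enough for every possible access
-- (this last conservatively excludes some ragged grids on which A happens to return).
def Pre_bfs (land : List (List Int)) (visited : List (List Bool)) (i : Int) (j : Int) : Prop :=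
  land ≠ [] ∧
  ( ¬(0 ≤ i ∧ i < (land.length : Int) ∧ 0 ≤ j ∧ j < ((land.headD []).length : Int))
  ∨ (i.toNat < visited.length ∧ j.toNat < (visited.getD i.toNat []).length ∧
      ((visited.getD i.toNat []).getD j.toNat false = true ∨
       (j.toNat < (land.getD i.toNat []).length ∧ (land.getD i.toNat []).getD j.toNat 0 = 0)))
  ∨ (land.length ≤ visited.length ∧
     (∀ row ∈ land, (land.headD []).length ≤ row.length) ∧
     (∀ row ∈ visited.take land.length, (land.headD []).length ≤ row.length)))

instance (land : List (List Int)) (visited : List (List Bool)) (i : Int) (j : Int) : Decidable (Pre_bfs land visited i j) := by unfold Pre_bfs; infer_instance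

def pvWitness_bfs : List (List Int) × List (List Bool) × Int × Int :=
  ([[1, 1], [0, 1]], [[false, false], [false, false]], 0, 0)

def Spec_bfs (land : List (List Int)) (visited : List (List Bool)) (i : Int) (j : Int) (out : Int × Int × Int) : Prop := out = bfs_alt land visited i j
instance (land : List (List Int)) (visited : List (List Bool)) (i : Int) (j : Int) (out : Int × Int × Int) : Decidable (Spec_bfs land visited i j out) := by unfold Spec_bfs; infer_instance

-- ===== CLAIM (what is proved, stated in full; the proofs are below) =====
def Claim_equal_bfs : Prop := ∀ (land : List (List Int)) (visited : List (List Bool)) (i : Int) (j : Int), Dom_bfs land visited i j → Pre_bfs land visited i j → Spec_bfs land visited i j (bfs land visited i j)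

-- ===== LEMMAS AND PROOFS =====

-- the four neighbours, in both programs' order (down, left, right, up)
def nbrs (p : Int × Int) : List (Int × Int) :=
  [(p.1 + 1, p.2), (p.1, p.2 - 1), (p.1, p.2 + 1), (p.1 - 1, p.2)]

-- shape adequacy: visited covers the rows × cols window (rows = R, cols = C as naturals)
def InvV (R C : Nat) (v : List (List Bool)) : Prop :=
  R ≤ v.length ∧ ∀ k, k < R → C ≤ (v.getD k []).length

-- the in-bounds cells, as a duplicate-free list of length R·C
def cellsL (R C : Nat) : List (Int × Int) :=
  ((List.range R) ×ˢ (List.range C)).map (fun ab => ((ab.1 : Int), (ab.2 : Int)))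

-- number of in-bounds unmarked cells: the loops' termination measure
def Ucnt (R C : Nat) (v : List (List Bool)) : Nat :=
  (cellsL R C).countP (fun p => !pvVget v p.1 p.2)

-- reachability through ok cells (the start cell itself is unconstrained)
inductive RTC (land : List (List Int)) (rows cols : Int) (v : List (List Bool)) :
    (Int × Int) → (Int × Int) → Prop
  | refl (p : Int × Int) : RTC land rows cols v p p
  | tail {p q r : Int × Int} : RTC land rows cols v p q → r ∈ nbrs q →
      okB land rows cols v r.1 r.2 = true → RTC land rows cols v p r

-- cells A will still mark, from a queue of unvalidated candidates
def SrcB (land : List (List Int)) (rows cols : Int) (v : List (List Bool))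
    (q : List (Int × Int)) (r : Int × Int) : Prop :=
  ∃ p ∈ q, okB land rows cols v p.1 p.2 = true ∧ RTC land rows cols v p r

-- cells B will still pop, from a stack of already-marked cells
def SrcD (land : List (List Int)) (rows cols : Int) (v : List (List Bool))
    (st : List (Int × Int)) (r : Int × Int) : Prop :=
  ∃ p ∈ st, RTC land rows cols v p r

def markList (v : List (List Bool)) (l : List (Int × Int)) : List (List Bool) :=
  l.foldl (fun v n => pvMark v n.1 n.2) v

-- ---- basic grid lemmas ----

theorem pvMark_length (v : List (List Bool)) (x y : Int) : (pvMark v x y).length = v.length := by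
  simp [pvMark]


theorem pvMark_row_length (v : List (List Bool)) (x y : Int) (k : Nat) :
    ((pvMark v x y).getD k []).length = (v.getD k []).length := by
  simp only [pvMark, List.getD_eq_getElem?_getD, List.getElem?_modify]
  cases h : v[k]? with
  | none => simp
  | some row =>
    simp only [Option.map_eq_map, Option.map_some, Option.getD_some]
    split <;> simp
theorem InvV_mark (R C : Nat) (v : List (List Bool)) (x y : Int) (h : InvV R C v) :
    InvV R C (pvMark v x y) := by
  obtain ⟨h1, h2⟩ := h
  exact ⟨by rw [pvMark_length]; exact h1, fun k hk => by rw [pvMark_row_length]; exact h2 k hk⟩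


theorem pvVget_mark_self (R C : Nat) (v : List (List Bool)) (x y : Int) (h : InvV R C v)
    (hx0 : 0 ≤ x) (hxR : x < (R : Int)) (hy0 : 0 ≤ y) (hyC : y < (C : Int)) :
    pvVget (pvMark v x y) x y = true := by
  obtain ⟨h1, h2⟩ := h
  have hxn : x.toNat < v.length := by omega
  have hyn : y.toNat < (v.getD x.toNat []).length := by
    have := h2 x.toNat (by omega); omega
  rw [List.getD_eq_getElem?_getD, List.getElem?_eq_getElem hxn] at hyn
  simp only [Option.getD_some] at hyn
  simp only [pvVget, pvMark, List.getD_eq_getElem?_getD, List.getElem?_modify,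
    List.getElem?_eq_getElem hxn, Option.map_eq_map, Option.map_some, Option.getD_some,
    if_pos rfl, if_true]
  rw [List.getElem?_set]
  simp [hyn]
theorem pvVget_mark_ne (v : List (List Bool)) (x y a b : Int)
    (hx0 : 0 ≤ x) (hy0 : 0 ≤ y) (ha0 : 0 ≤ a) (hb0 : 0 ≤ b) (hne : (a, b) ≠ (x, y)) :
    pvVget (pvMark v x y) a b = pvVget v a b := by
  have hne2 : a ≠ x ∨ b ≠ y := by
    by_contra hcon; push_neg at hcon; exact hne (by simp [hcon.1, hcon.2])
  simp only [pvVget, pvMark, List.getD_eq_getElem?_getD, List.getElem?_modify]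
  by_cases hr : x.toNat = a.toNat
  · have hab : b.toNat ≠ y.toNat := by omega
    cases h : v[a.toNat]? with
    | none => simp [hr, h]
    | some row =>
      simp only [hr, h, Option.map_eq_map, Option.map_some, Option.getD_some, if_pos rfl, if_true]
      rw [List.getElem?_set, if_neg (by omega)]
  · cases h : v[a.toNat]? with
    | none => simp [hr, h]
    | some row => simp [hr, h]
theorem pvVget_mark_mono (v : List (List Bool)) (x y a b : Int)
    (h : pvVget v a b = true) : pvVget (pvMark v x y) a b = true := by
  simp only [pvVget, pvMark, List.getD_eq_getElem?_getD, List.getElem?_modify] at h ⊢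
  cases hv : v[a.toNat]? with
  | none => simp [hv] at h
  | some row =>
    simp only [hv, Option.getD_some] at h
    by_cases hr : x.toNat = a.toNat
    · simp only [hv, hr, Option.map_eq_map, Option.map_some, Option.getD_some, if_pos rfl, if_true]
      rw [List.getElem?_set]
      by_cases hc : y.toNat = b.toNat
      · rcases hrow : row[b.toNat]? with _ | c
        · rw [hrow] at h; simp at h
        · have hlt : b.toNat < row.length := (List.getElem?_eq_some_iff.1 hrow).1
          rw [if_pos (by omega), if_pos (by omega)]; simp
      · rw [if_neg (by omega)]; exact h
    · simp [hv, hr, h]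
theorem okB_bounds (land : List (List Int)) (rows cols : Int) (v : List (List Bool)) (x y : Int)
    (h : okB land rows cols v x y = true) :
    (0 ≤ x ∧ x < rows ∧ 0 ≤ y ∧ y < cols) ∧ pvVget v x y = false := by
  simp only [okB, Bool.and_eq_true, decide_eq_true_eq, Bool.not_eq_eq_eq_not, Bool.not_true,
    bne_iff_ne] at h
  exact ⟨h.1.1, by simpa using h.1.2⟩


theorem okB_mark_self (R C : Nat) (land : List (List Int)) (v : List (List Bool)) (x y : Int)
    (hI : InvV R C v) (hok : okB land (R : Int) (C : Int) v x y = true) :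
    okB land (R : Int) (C : Int) (pvMark v x y) x y = false := by
  obtain ⟨hb, _⟩ := okB_bounds _ _ _ _ _ _ hok
  have := pvVget_mark_self R C v x y hI hb.1 hb.2.1 hb.2.2.1 hb.2.2.2
  simp [okB, this]


theorem okB_mark_ne (R C : Nat) (land : List (List Int)) (v : List (List Bool)) (x y a b : Int)
    (hx0 : 0 ≤ x) (hy0 : 0 ≤ y) (hne : (a, b) ≠ (x, y)) :
    okB land (R : Int) (C : Int) (pvMark v x y) a b = okB land (R : Int) (C : Int) v a b := by
  by_cases hb : 0 ≤ a ∧ a < (R : Int) ∧ 0 ≤ b ∧ b < (C : Int)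
  · unfold okB
    rw [pvVget_mark_ne v x y a b hx0 hy0 hb.1 hb.2.2.1 hne]
  · simp [okB, hb]


theorem okB_mark_mono (R C : Nat) (land : List (List Int)) (v : List (List Bool)) (x y a b : Int)
    (hI : InvV R C v) (hok : okB land (R : Int) (C : Int) v x y = true)
    (h : okB land (R : Int) (C : Int) (pvMark v x y) a b = true) :
    okB land (R : Int) (C : Int) v a b = true ∧ (a, b) ≠ (x, y) := by
  have hne : (a, b) ≠ (x, y) := by
    intro he
    injection he with h1 h2
    subst h1; subst h2
    rw [okB_mark_self R C land v a b hI hok] at h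
    exact Bool.false_ne_true h
  obtain ⟨hb, _⟩ := okB_bounds _ _ _ _ _ _ hok
  rw [okB_mark_ne R C land v x y a b hb.1 hb.2.2.1 hne] at h
  exact ⟨h, hne⟩

-- ---- counting lemmas ----

theorem countP_flip {α : Type} (a : α) (f g : α → Bool) (hfa : f a = false) (hga : g a = true) :
    ∀ l : List α, l.Nodup → a ∈ l → (∀ b ∈ l, b ≠ a → f b = g b) →
    l.countP f + 1 = l.countP g := by
  intro l
  induction l with
  | nil => intro _ ha; exact absurd ha (List.not_mem_nil)
  | cons c t ih =>
    intro hnd hmem hoth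
    by_cases hac : a = c
    · subst hac
      have hnotin : a ∉ t := (List.nodup_cons.1 hnd).1
      have ht : t.countP f = t.countP g := List.countP_congr (fun b hb => by
        rw [hoth b (List.mem_cons_of_mem _ hb) (fun hba => hnotin (hba ▸ hb))])
      simp [List.countP_cons, hfa, hga, ht]
    · have hat : a ∈ t := by
        rcases List.mem_cons.1 hmem with h | h
        · exact absurd h hac
        · exact h
      have hfc : f c = g c := hoth c (List.mem_cons_self) (fun h => hac h.symm)
      have ht := ih (List.nodup_cons.1 hnd).2 hat (fun b hb => hoth b (List.mem_cons_of_mem _ hb))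
      simp only [List.countP_cons, hfc]
      omega

theorem mem_cellsL (R C : Nat) (p : Int × Int) :
    p ∈ cellsL R C ↔ 0 ≤ p.1 ∧ p.1 < (R : Int) ∧ 0 ≤ p.2 ∧ p.2 < (C : Int) := by
  obtain ⟨p1, p2⟩ := p
  simp only [cellsL, List.mem_map, List.mem_product, List.mem_range, Prod.mk.injEq, Prod.exists]
  constructor
  · rintro ⟨a, b, ⟨haR, hbC⟩, rfl, rfl⟩
    refine ⟨by positivity, ?_, by positivity, ?_⟩ <;> [exact_mod_cast haR; exact_mod_cast hbC]
  · rintro ⟨h1, h2, h3, h4⟩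
    exact ⟨p1.toNat, p2.toNat, ⟨by omega, by omega⟩, by omega, by omega⟩

theorem cellsL_nodup (R C : Nat) : (cellsL R C).Nodup := by
  refine List.Nodup.map ?_ (List.Nodup.product (List.nodup_range) (List.nodup_range))
  rintro ⟨a, b⟩ ⟨c, d⟩ h
  simp only [Prod.mk.injEq] at h ⊢
  omega

theorem Ucnt_le (R C : Nat) (v : List (List Bool)) : Ucnt R C v ≤ R * C := by
  unfold Ucnt
  calc (cellsL R C).countP _ ≤ (cellsL R C).length := List.countP_le_length
    _ = R * C := by simp [cellsL, List.length_product]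

theorem Ucnt_mark (R C : Nat) (land : List (List Int)) (v : List (List Bool)) (x y : Int)
    (hI : InvV R C v) (hok : okB land (R : Int) (C : Int) v x y = true) :
    Ucnt R C (pvMark v x y) + 1 = Ucnt R C v := by
  obtain ⟨hb, hv⟩ := okB_bounds _ _ _ _ _ _ hok
  refine countP_flip (x, y) _ _ ?_ ?_ (cellsL R C) (cellsL_nodup R C) ((mem_cellsL R C _).2 hb) ?_
  · show (!pvVget (pvMark v x y) x y) = false
    rw [pvVget_mark_self R C v x y hI hb.1 hb.2.1 hb.2.2.1 hb.2.2.2]; rfl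
  · show (!pvVget v x y) = true
    rw [hv]; rfl
  · intro b hbmem hbne
    obtain ⟨hb1, _, hb2, _⟩ := (mem_cellsL R C b).1 hbmem
    show (!pvVget (pvMark v x y) b.1 b.2) = (!pvVget v b.1 b.2)
    rw [pvVget_mark_ne v x y b.1 b.2 hb.1 hb.2.2.1 hb1 hb2 (by simpa using hbne)]

-- ---- reachability lemmas ----

theorem rtc_trans (land : List (List Int)) (rows cols : Int) (v : List (List Bool))
    {p q r : Int × Int} (h1 : RTC land rows cols v p q) (h2 : RTC land rows cols v q r) :
    RTC land rows cols v p r := by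
  induction h2 with
  | refl => exact h1
  | tail h hmem hok ih => exact RTC.tail ih hmem hok

theorem rtc_ok (land : List (List Int)) (rows cols : Int) (v : List (List Bool))
    {p r : Int × Int} (h : RTC land rows cols v p r) :
    r = p ∨ okB land rows cols v r.1 r.2 = true := by
  induction h with
  | refl => exact Or.inl rfl
  | tail h hmem hok ih => exact Or.inr hok

theorem rtc_mono (land : List (List Int)) (rows cols : Int) (v v' : List (List Bool))
    (hmono : ∀ a b : Int, okB land rows cols v' a b = true → okB land rows cols v a b = true)
    {p r : Int × Int} (h : RTC land rows cols v' p r) : RTC land rows cols v p r := by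
  induction h with
  | refl => exact RTC.refl _
  | tail h hmem hok ih => exact RTC.tail ih hmem (hmono _ _ hok)

-- BFS closure step: processing an ok queue head p marks it and defers its neighbours
theorem srcB_step (R C : Nat) (land : List (List Int)) (v : List (List Bool))
    (p : Int × Int) (rest : List (Int × Int)) (hI : InvV R C v)
    (hok : okB land (R : Int) (C : Int) v p.1 p.2 = true) (r : Int × Int) :
    SrcB land (R : Int) (C : Int) v (p :: rest) r ↔
      (r = p ∨ SrcB land (R : Int) (C : Int) (pvMark v p.1 p.2) (rest ++ nbrs p) r) := by
  obtain ⟨hb, _⟩ := okB_bounds _ _ _ _ _ _ hok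
  constructor
  · rintro ⟨s, hs, hoks, hrtc⟩
    have aux : ∀ s' r', RTC land (R : Int) (C : Int) v s' r' → s' ∈ p :: rest →
        okB land (R : Int) (C : Int) v s'.1 s'.2 = true →
        r' = p ∨ SrcB land (R : Int) (C : Int) (pvMark v p.1 p.2) (rest ++ nbrs p) r' := by
      intro s' r' hrtc'
      induction hrtc' with
      | refl =>
        intro hq hokq
        by_cases hqp : s' = p
        · exact Or.inl hqp
        · rcases List.mem_cons.1 hq with rfl | hq2
          · exact absurd rfl hqp
          · refine Or.inr ⟨s', List.mem_append_left _ hq2, ?_, RTC.refl s'⟩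
            rw [okB_mark_ne R C land v p.1 p.2 s'.1 s'.2 hb.1 hb.2.2.1
              (by simpa [Prod.ext_iff] using hqp)]
            exact hokq
      | @tail q0 r0 h1 hmem hokr ih =>
        intro hs hoks
        by_cases hrp : r0 = p
        · exact Or.inl hrp
        · have hokr' : okB land (R : Int) (C : Int) (pvMark v p.1 p.2) r0.1 r0.2 = true := by
            rw [okB_mark_ne R C land v p.1 p.2 r0.1 r0.2 hb.1 hb.2.2.1
              (by simpa [Prod.ext_iff] using hrp)]
            exact hokr
          rcases ih hs hoks with rfl | ⟨n, hn, hokn, hr'⟩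
          · exact Or.inr ⟨r0, List.mem_append_right _ hmem, hokr', RTC.refl r0⟩
          · exact Or.inr ⟨n, hn, hokn, RTC.tail hr' hmem hokr'⟩
    exact aux s r hrtc hs hoks
  · rintro (heq | ⟨n, hn, hokn, hrtc⟩)
    · subst heq; exact ⟨r, List.mem_cons_self, hok, RTC.refl r⟩
    · have hmono : ∀ a b : Int, okB land (R : Int) (C : Int) (pvMark v p.1 p.2) a b = true →
          okB land (R : Int) (C : Int) v a b = true :=
        fun a b hab => (okB_mark_mono R C land v p.1 p.2 a b hI hok hab).1
      have hchain : RTC land (R : Int) (C : Int) v n r :=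
        rtc_mono land (R : Int) (C : Int) v (pvMark v p.1 p.2) hmono hrtc
      have hokn' := (okB_mark_mono R C land v p.1 p.2 n.1 n.2 hI hok hokn).1
      rcases List.mem_append.1 hn with hn2 | hn2
      · exact ⟨n, List.mem_cons_of_mem _ hn2, hokn', hchain⟩
      · exact ⟨p, List.mem_cons_self, hok,
          rtc_trans land (R : Int) (C : Int) v (RTC.tail (RTC.refl p) hn2 hokn') hchain⟩

theorem srcB_not_self (R C : Nat) (land : List (List Int)) (v : List (List Bool))
    (p : Int × Int) (q : List (Int × Int)) (hI : InvV R C v)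
    (hok : okB land (R : Int) (C : Int) v p.1 p.2 = true) :
    ¬ SrcB land (R : Int) (C : Int) (pvMark v p.1 p.2) q p := by
  rintro ⟨s, hs, hoks, hrtc⟩
  rcases rtc_ok _ _ _ _ hrtc with heq | hokp
  · subst heq
    rw [okB_mark_self R C land v p.1 p.2 hI hok] at hoks
    exact Bool.false_ne_true hoks
  · rw [okB_mark_self R C land v p.1 p.2 hI hok] at hokp
    exact Bool.false_ne_true hokp

theorem srcB_skip (land : List (List Int)) (rows cols : Int) (v : List (List Bool))
    (p : Int × Int) (rest : List (Int × Int)) (hok : okB land rows cols v p.1 p.2 = false)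
    (r : Int × Int) : SrcB land rows cols v (p :: rest) r ↔ SrcB land rows cols v rest r := by
  constructor
  · rintro ⟨s, hs, hoks, hrtc⟩
    rcases List.mem_cons.1 hs with rfl | hs
    · rw [hok] at hoks; exact absurd hoks (by simp)
    · exact ⟨s, hs, hoks, hrtc⟩
  · rintro ⟨s, hs, hoks, hrtc⟩
    exact ⟨s, List.mem_cons_of_mem _ hs, hoks, hrtc⟩

-- ---- the BFS run theorem ----

theorem bfs_run (land : List (List Int)) (R C : Nat) :
    ∀ (fuel : Nat) (v : List (List Bool)) (q : List (Int × Int)) (sz mn mx : Int),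
    InvV R C v → q.length + 4 * Ucnt R C v ≤ fuel →
    ∃ L : List (Int × Int), L.Nodup ∧
      (∀ r, r ∈ L ↔ SrcB land (R : Int) (C : Int) v q r) ∧
      bfsLoop land (R : Int) (C : Int) fuel v q sz mn mx
        = (sz + (L.length : Int), (L.map Prod.snd).foldl min mn, (L.map Prod.snd).foldl max mx) := by
  intro fuel
  induction fuel with
  | zero =>
    intro v q sz mn mx hI hf
    cases q with
    | nil => exact ⟨[], List.nodup_nil, by simp [SrcB], by simp [bfsLoop]⟩
    | cons a t => exfalso; simp [List.length_cons] at hf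
  | succ t ih =>
    intro v q sz mn mx hI hf
    cases q with
    | nil => exact ⟨[], List.nodup_nil, by simp [SrcB], by simp [bfsLoop]⟩
    | cons hd rest =>
      obtain ⟨x, y⟩ := hd
      have hnb : [(x+1, y), (x, y-1), (x, y+1), (x-1, y)] = nbrs (x, y) := rfl
      by_cases hbnd : 0 ≤ x ∧ x < (R : Int) ∧ 0 ≤ y ∧ y < (C : Int)
      · by_cases hskip : (pvVget v x y || pvLget land x y == 0) = true
        · have hok : okB land (R : Int) (C : Int) v x y = false := by
            have hsk : pvVget v x y = true ∨ pvLget land x y = 0 := by simpa using hskip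
            rcases hsk with h | h
            · simp [okB, h]
            · simp [okB, h]
          obtain ⟨L, hnd, hmem, heq⟩ := ih v rest sz mn mx hI
            (by simp only [List.length_cons] at hf; omega)
          refine ⟨L, hnd, ?_, ?_⟩
          · intro r
            rw [hmem r]
            exact (srcB_skip land (R : Int) (C : Int) v (x, y) rest hok r).symm
          · have hstep : bfsLoop land (R : Int) (C : Int) (t+1) v ((x, y) :: rest) sz mn mx
                = bfsLoop land (R : Int) (C : Int) t v rest sz mn mx := by
              simp only [bfsLoop]
              rw [if_neg (by simpa using hbnd), if_pos hskip]
            rw [hstep, heq]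
        · have hsk : ¬(pvVget v x y = true ∨ pvLget land x y = 0) := by simpa using hskip
          have hv : pvVget v x y = false := by
            cases h : pvVget v x y
            · rfl
            · exact absurd (Or.inl h) hsk
          have hl0 : pvLget land x y ≠ 0 := fun h => hsk (Or.inr h)
          have hok : okB land (R : Int) (C : Int) v x y = true := by
            simp [okB, hbnd, hv, hl0]
          have hI' := InvV_mark R C v x y hI
          have hUm := Ucnt_mark R C land v x y hI hok
          obtain ⟨L, hnd, hmem, heq⟩ := ih (pvMark v x y) (rest ++ nbrs (x, y)) (sz+1)
            (min mn y) (max mx y) hI'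
            (by simp only [List.length_cons] at hf
                simp only [List.length_append]
                have : (nbrs (x, y)).length = 4 := rfl
                omega)
          refine ⟨(x, y) :: L, ?_, ?_, ?_⟩
          · refine List.nodup_cons.2 ⟨fun hc => ?_, hnd⟩
            exact srcB_not_self R C land v (x, y) _ hI hok ((hmem _).1 hc)
          · intro r
            rw [List.mem_cons, hmem r]
            exact (srcB_step R C land v (x, y) rest hI hok r).symm
          · have hstep : bfsLoop land (R : Int) (C : Int) (t+1) v ((x, y) :: rest) sz mn mx
                = bfsLoop land (R : Int) (C : Int) t (pvMark v x y) (rest ++ nbrs (x, y))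
                    (sz+1) (min mn y) (max mx y) := by
              simp only [bfsLoop]
              rw [if_neg (by simpa using hbnd), if_neg hskip, hnb]
            rw [hstep, heq]
            simp only [List.length_cons, List.map_cons, List.foldl_cons, Prod.mk.injEq]
            push_cast
            exact ⟨by ring, trivial⟩
      · have hok : okB land (R : Int) (C : Int) v x y = false := by
          simp [okB, hbnd]
        obtain ⟨L, hnd, hmem, heq⟩ := ih v rest sz mn mx hI
          (by simp only [List.length_cons] at hf; omega)
        refine ⟨L, hnd, ?_, ?_⟩
        · intro r
          rw [hmem r]
          exact (srcB_skip land (R : Int) (C : Int) v (x, y) rest hok r).symm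
        · have hstep : bfsLoop land (R : Int) (C : Int) (t+1) v ((x, y) :: rest) sz mn mx
              = bfsLoop land (R : Int) (C : Int) t v rest sz mn mx := by
            simp only [bfsLoop]
            rw [if_pos (by simpa using hbnd)]
          rw [hstep, heq]

-- ---- the DFS inner fold ----

theorem foldStep_char (R C : Nat) (land : List (List Int)) :
    ∀ (ns : List (Int × Int)) (v : List (List Bool)) (rest : List (Int × Int)),
    InvV R C v → ns.Nodup →
    ns.foldl (fun (s : List (List Bool) × List (Int × Int)) n =>
        if okB land (R : Int) (C : Int) s.1 n.1 n.2 then (pvMark s.1 n.1 n.2, n :: s.2) else s)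
      (v, rest)
      = (markList v (ns.filter (fun n => okB land (R : Int) (C : Int) v n.1 n.2)),
         (ns.filter (fun n => okB land (R : Int) (C : Int) v n.1 n.2)).reverse ++ rest) := by
  intro ns
  induction ns with
  | nil => intro v rest _ _; simp [markList]
  | cons n ns' ih =>
    intro v rest hI hnd
    simp only [List.foldl_cons]
    by_cases h : okB land (R : Int) (C : Int) v n.1 n.2 = true
    · rw [if_pos h]
      rw [ih (pvMark v n.1 n.2) (n :: rest) (InvV_mark R C v n.1 n.2 hI)
        (List.nodup_cons.1 hnd).2]
      obtain ⟨hb, _⟩ := okB_bounds _ _ _ _ _ _ h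
      have hfil : ns'.filter (fun m => okB land (R : Int) (C : Int) (pvMark v n.1 n.2) m.1 m.2)
          = ns'.filter (fun m => okB land (R : Int) (C : Int) v m.1 m.2) := by
        refine List.filter_congr (fun m hm => ?_)
        have hmn : m ≠ n := fun hmn => (List.nodup_cons.1 hnd).1 (hmn ▸ hm)
        rw [okB_mark_ne R C land v n.1 n.2 m.1 m.2 hb.1 hb.2.2.1
          (by simpa [Prod.ext_iff] using hmn)]
      rw [hfil]
      have hfc : (n :: ns').filter (fun m => okB land (R : Int) (C : Int) v m.1 m.2)
          = n :: ns'.filter (fun m => okB land (R : Int) (C : Int) v m.1 m.2) :=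
        List.filter_cons_of_pos h
      rw [hfc]
      refine Prod.ext ?_ ?_
      · rfl
      · simp
    · rw [if_neg h]
      rw [ih v rest hI (List.nodup_cons.1 hnd).2, List.filter_cons_of_neg (by simpa using h)]

theorem InvV_markList (R C : Nat) (v : List (List Bool)) (l : List (Int × Int))
    (h : InvV R C v) : InvV R C (markList v l) := by
  induction l generalizing v with
  | nil => exact h
  | cons n t ih => exact ih _ (InvV_mark R C v n.1 n.2 h)

theorem pvVget_markList_mono (v : List (List Bool)) (l : List (Int × Int)) (a b : Int)
    (h : pvVget v a b = true) : pvVget (markList v l) a b = true := by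
  induction l generalizing v with
  | nil => exact h
  | cons n t ih => exact ih _ (pvVget_mark_mono v n.1 n.2 a b h)

theorem pvVget_markList_self (R C : Nat) (land : List (List Int)) (v : List (List Bool))
    (l : List (Int × Int)) (hI : InvV R C v) (hln : l.Nodup)
    (hl : ∀ n ∈ l, okB land (R : Int) (C : Int) v n.1 n.2 = true) :
    ∀ p ∈ l, pvVget (markList v l) p.1 p.2 = true := by
  induction l generalizing v with
  | nil => intro p hp; exact absurd hp (List.not_mem_nil)
  | cons n t ih =>
    intro p hp
    have hokn := hl n (List.mem_cons_self)
    obtain ⟨hb, _⟩ := okB_bounds _ _ _ _ _ _ hokn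
    rcases List.mem_cons.1 hp with rfl | hpt
    · show pvVget (markList (pvMark v p.1 p.2) t) p.1 p.2 = true
      exact pvVget_markList_mono _ _ _ _
        (pvVget_mark_self R C v p.1 p.2 hI hb.1 hb.2.1 hb.2.2.1 hb.2.2.2)
    · refine ih (pvMark v n.1 n.2) (InvV_mark R C v n.1 n.2 hI) (List.nodup_cons.1 hln).2
        (fun m hm => ?_) p hpt
      have hmn : m ≠ n := fun hmn => (List.nodup_cons.1 hln).1 (hmn ▸ hm)
      rw [okB_mark_ne R C land v n.1 n.2 m.1 m.2 hb.1 hb.2.2.1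
        (by simpa [Prod.ext_iff] using hmn)]
      exact hl m (List.mem_cons_of_mem _ hm)

theorem okB_markList (R C : Nat) (land : List (List Int)) (v : List (List Bool))
    (l : List (Int × Int)) (hI : InvV R C v) (hln : l.Nodup)
    (hl : ∀ n ∈ l, okB land (R : Int) (C : Int) v n.1 n.2 = true) (a : Int × Int) :
    okB land (R : Int) (C : Int) (markList v l) a.1 a.2
      = (okB land (R : Int) (C : Int) v a.1 a.2 && !(decide (a ∈ l))) := by
  induction l generalizing v with
  | nil => simp [markList]
  | cons n t ih =>
    have hokn := hl n (List.mem_cons_self)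
    obtain ⟨hb, _⟩ := okB_bounds _ _ _ _ _ _ hokn
    have hstep : ∀ m ∈ t, okB land (R : Int) (C : Int) (pvMark v n.1 n.2) m.1 m.2 = true := by
      intro m hm
      have hmn : m ≠ n := fun hmn => (List.nodup_cons.1 hln).1 (hmn ▸ hm)
      rw [okB_mark_ne R C land v n.1 n.2 m.1 m.2 hb.1 hb.2.2.1
        (by simpa [Prod.ext_iff] using hmn)]
      exact hl m (List.mem_cons_of_mem _ hm)
    show okB land (R : Int) (C : Int) (markList (pvMark v n.1 n.2) t) a.1 a.2 = _
    rw [ih (pvMark v n.1 n.2) (InvV_mark R C v n.1 n.2 hI) (List.nodup_cons.1 hln).2 hstep]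
    by_cases han : a = n
    · subst han
      rw [okB_mark_self R C land v a.1 a.2 hI (by simpa using hokn)]
      simp
    · rw [okB_mark_ne R C land v n.1 n.2 a.1 a.2 hb.1 hb.2.2.1
        (by simpa [Prod.ext_iff] using han)]
      simp [List.mem_cons, han]

theorem Ucnt_markList (R C : Nat) (land : List (List Int)) (v : List (List Bool))
    (l : List (Int × Int)) (hI : InvV R C v) (hln : l.Nodup)
    (hl : ∀ n ∈ l, okB land (R : Int) (C : Int) v n.1 n.2 = true) :
    Ucnt R C (markList v l) + l.length = Ucnt R C v := by
  induction l generalizing v with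
  | nil => simp [markList]
  | cons n t ih =>
    have hokn := hl n (List.mem_cons_self)
    obtain ⟨hb, _⟩ := okB_bounds _ _ _ _ _ _ hokn
    have hstep : ∀ m ∈ t, okB land (R : Int) (C : Int) (pvMark v n.1 n.2) m.1 m.2 = true := by
      intro m hm
      have hmn : m ≠ n := fun hmn => (List.nodup_cons.1 hln).1 (hmn ▸ hm)
      rw [okB_mark_ne R C land v n.1 n.2 m.1 m.2 hb.1 hb.2.2.1
        (by simpa [Prod.ext_iff] using hmn)]
      exact hl m (List.mem_cons_of_mem _ hm)
    have h1 := ih (pvMark v n.1 n.2) (InvV_mark R C v n.1 n.2 hI) (List.nodup_cons.1 hln).2 hstep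
    have h2 := Ucnt_mark R C land v n.1 n.2 hI hokn
    show Ucnt R C (markList (pvMark v n.1 n.2) t) + (t.length + 1) = Ucnt R C v
    omega

theorem nbrs_nodup (p : Int × Int) : (nbrs p).Nodup := by
  simp [nbrs, List.nodup_cons, Prod.ext_iff]
  omega

-- DFS closure step: popping marked p, its ok neighbours get marked and pushed
theorem srcD_step (R C : Nat) (land : List (List Int)) (v : List (List Bool))
    (p : Int × Int) (rest : List (Int × Int)) (hI : InvV R C v)
    (hmk : pvVget v p.1 p.2 = true)
    (hrest : ∀ q ∈ rest, pvVget v q.1 q.2 = true)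
    (r : Int × Int) :
    SrcD land (R : Int) (C : Int) v (p :: rest) r ↔
      (r = p ∨ SrcD land (R : Int) (C : Int)
        (markList v ((nbrs p).filter (fun n => okB land (R : Int) (C : Int) v n.1 n.2)))
        (((nbrs p).filter (fun n => okB land (R : Int) (C : Int) v n.1 n.2)).reverse ++ rest) r) := by
  have hnodupN : ((nbrs p).filter (fun n => okB land (R : Int) (C : Int) v n.1 n.2)).Nodup :=
    (nbrs_nodup p).filter _
  have hlN : ∀ n ∈ (nbrs p).filter (fun n => okB land (R : Int) (C : Int) v n.1 n.2),
      okB land (R : Int) (C : Int) v n.1 n.2 = true := fun n hn => (List.mem_filter.1 hn).2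
  have hokL := okB_markList R C land v _ hI hnodupN hlN
  constructor
  · rintro ⟨s, hs, hrtc⟩
    have aux : ∀ s' r', RTC land (R : Int) (C : Int) v s' r' → s' ∈ p :: rest →
        r' = p ∨ SrcD land (R : Int) (C : Int)
          (markList v ((nbrs p).filter (fun n => okB land (R : Int) (C : Int) v n.1 n.2)))
          (((nbrs p).filter (fun n => okB land (R : Int) (C : Int) v n.1 n.2)).reverse ++ rest)
          r' := by
      intro s' r' hrtc'
      induction hrtc' with
      | refl =>
        intro hq
        rcases List.mem_cons.1 hq with rfl | hq2
        · exact Or.inl rfl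
        · exact Or.inr ⟨s', List.mem_append_right _ hq2, RTC.refl s'⟩
      | @tail q0 r0 h1 hmem hokr ih =>
        intro hs'
        by_cases hrn : r0 ∈ (nbrs p).filter (fun n => okB land (R : Int) (C : Int) v n.1 n.2)
        · exact Or.inr ⟨r0, List.mem_append_left _ (List.mem_reverse.2 hrn), RTC.refl r0⟩
        · have hokr' : okB land (R : Int) (C : Int)
              (markList v ((nbrs p).filter (fun n => okB land (R : Int) (C : Int) v n.1 n.2)))
              r0.1 r0.2 = true := by
            rw [hokL r0]
            simp [hokr, hrn]
          rcases ih hs' with rfl | ⟨n, hn, hr'⟩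
          · exact absurd (List.mem_filter.2 ⟨hmem, hokr⟩) hrn
          · exact Or.inr ⟨n, hn, RTC.tail hr' hmem hokr'⟩
    exact aux s r hrtc hs
  · rintro (heq | ⟨n, hn, hchain⟩)
    · subst heq; exact ⟨r, List.mem_cons_self, RTC.refl r⟩
    · have hmono : ∀ a b : Int, okB land (R : Int) (C : Int)
          (markList v ((nbrs p).filter (fun n => okB land (R : Int) (C : Int) v n.1 n.2))) a b = true →
          okB land (R : Int) (C : Int) v a b = true := by
        intro a b hab
        rw [hokL (a, b)] at hab
        rw [Bool.and_eq_true] at hab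
        exact hab.1
      have hchain' : RTC land (R : Int) (C : Int) v n r :=
        rtc_mono land (R : Int) (C : Int) v _ hmono hchain
      rcases List.mem_append.1 hn with hn2 | hn2
      · have hn3 := List.mem_reverse.1 hn2
        have hnn : n ∈ nbrs p := (List.mem_filter.1 hn3).1
        have hokn : okB land (R : Int) (C : Int) v n.1 n.2 = true := (List.mem_filter.1 hn3).2
        exact ⟨p, List.mem_cons_self,
          rtc_trans land (R : Int) (C : Int) v (RTC.tail (RTC.refl p) hnn hokn) hchain'⟩
      · exact ⟨n, List.mem_cons_of_mem _ hn2, hchain'⟩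

theorem srcD_not_self (R C : Nat) (land : List (List Int)) (v : List (List Bool))
    (p : Int × Int) (st : List (Int × Int)) (hp : pvVget v p.1 p.2 = true)
    (hst : p ∉ st) (hstm : ∀ q ∈ st, pvVget v q.1 q.2 = true) :
    ¬ SrcD land (R : Int) (C : Int) v st p := by
  rintro ⟨s, hs, hrtc⟩
  rcases rtc_ok _ _ _ _ hrtc with heq | hokp
  · exact hst (heq ▸ hs)
  · simp [okB, hp] at hokp

-- ---- the DFS run theorem ----

theorem dfs_run (land : List (List Int)) (R C : Nat) :
    ∀ (fuel : Nat) (v : List (List Bool)) (st : List (Int × Int)) (sz mn mx : Int),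
    InvV R C v → st.length + Ucnt R C v ≤ fuel → st.Nodup →
    (∀ p ∈ st, pvVget v p.1 p.2 = true) →
    ∃ L : List (Int × Int), L.Nodup ∧
      (∀ r, r ∈ L ↔ SrcD land (R : Int) (C : Int) v st r) ∧
      dfsLoop land (R : Int) (C : Int) fuel v st sz mn mx
        = (sz + (L.length : Int), (L.map Prod.snd).foldl min mn, (L.map Prod.snd).foldl max mx) := by
  intro fuel
  induction fuel with
  | zero =>
    intro v st sz mn mx hI hf hnd hstm
    cases st with
    | nil => exact ⟨[], List.nodup_nil, by simp [SrcD], by simp [dfsLoop]⟩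
    | cons a t => exfalso; simp [List.length_cons] at hf
  | succ t ih =>
    intro v st sz mn mx hI hf hnd hstm
    cases st with
    | nil => exact ⟨[], List.nodup_nil, by simp [SrcD], by simp [dfsLoop]⟩
    | cons hd rest =>
      obtain ⟨x, y⟩ := hd
      have hnb : [(x+1, y), (x, y-1), (x, y+1), (x-1, y)] = nbrs (x, y) := rfl
      have hmkp : pvVget v x y = true := hstm (x, y) (List.mem_cons_self)
      have hrestm : ∀ q ∈ rest, pvVget v q.1 q.2 = true :=
        fun q hq => hstm q (List.mem_cons_of_mem _ hq)
      have hnodupN : ((nbrs (x, y)).filter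
          (fun n => okB land (R : Int) (C : Int) v n.1 n.2)).Nodup := (nbrs_nodup _).filter _
      have hlN : ∀ n ∈ (nbrs (x, y)).filter (fun n => okB land (R : Int) (C : Int) v n.1 n.2),
          okB land (R : Int) (C : Int) v n.1 n.2 = true := fun n hn => (List.mem_filter.1 hn).2
      have hfold := foldStep_char R C land (nbrs (x, y)) v rest hI (nbrs_nodup _)
      have hI' := InvV_markList R C v
        ((nbrs (x, y)).filter (fun n => okB land (R : Int) (C : Int) v n.1 n.2)) hI
      have hUm := Ucnt_markList R C land v _ hI hnodupN hlN
      have hnewlen : ((nbrs (x, y)).filter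
          (fun n => okB land (R : Int) (C : Int) v n.1 n.2)).length ≤ 4 := by
        have h4 := List.length_filter_le
          (fun n : Int × Int => okB land (R : Int) (C : Int) v n.1 n.2) (nbrs (x, y))
        simpa using h4
      have hdisj : ∀ a ∈ ((nbrs (x, y)).filter
          (fun n => okB land (R : Int) (C : Int) v n.1 n.2)).reverse, ∀ b ∈ rest, a ≠ b := by
        intro a ha b hbr heq
        subst heq
        have har := hbr
        have hok := (List.mem_filter.1 (List.mem_reverse.1 ha)).2
        have := (okB_bounds _ _ _ _ _ _ hok).2
        rw [hrestm a har] at this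
        exact absurd this (by simp)
      have hnd' : (((nbrs (x, y)).filter
          (fun n => okB land (R : Int) (C : Int) v n.1 n.2)).reverse ++ rest).Nodup :=
        List.nodup_append.2 ⟨(List.nodup_reverse).2 hnodupN, (List.nodup_cons.1 hnd).2, hdisj⟩
      have hstm' : ∀ q ∈ ((nbrs (x, y)).filter
          (fun n => okB land (R : Int) (C : Int) v n.1 n.2)).reverse ++ rest,
          pvVget (markList v ((nbrs (x, y)).filter
            (fun n => okB land (R : Int) (C : Int) v n.1 n.2))) q.1 q.2 = true := by
        intro q hq
        rcases List.mem_append.1 hq with h | h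
        · exact pvVget_markList_self R C land v _ hI hnodupN hlN q (List.mem_reverse.1 h)
        · exact pvVget_markList_mono v _ q.1 q.2 (hrestm q h)
      obtain ⟨L, hndL, hmem, heq⟩ := ih
        (markList v ((nbrs (x, y)).filter (fun n => okB land (R : Int) (C : Int) v n.1 n.2)))
        (((nbrs (x, y)).filter (fun n => okB land (R : Int) (C : Int) v n.1 n.2)).reverse ++ rest)
        (sz+1) (min mn y) (max mx y) hI'
        (by simp only [List.length_cons] at hf
            simp only [List.length_append, List.length_reverse]
            omega)
        hnd' hstm'
      refine ⟨(x, y) :: L, ?_, ?_, ?_⟩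
      · refine List.nodup_cons.2 ⟨fun hc => ?_, hndL⟩
        have hsrc := (hmem _).1 hc
        refine srcD_not_self R C land _ (x, y) _ ?_ ?_ hstm' hsrc
        · exact pvVget_markList_mono v _ x y hmkp
        · intro hmem2
          rcases List.mem_append.1 hmem2 with h | h
          · have hok := (List.mem_filter.1 (List.mem_reverse.1 h)).2
            have := (okB_bounds _ _ _ _ _ _ hok).2
            rw [hmkp] at this
            exact absurd this (by simp)
          · exact (List.nodup_cons.1 hnd).1 h
      · intro r
        rw [List.mem_cons, hmem r]
        exact (srcD_step R C land v (x, y) rest hI hmkp hrestm r).symm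
      · have hstep : dfsLoop land (R : Int) (C : Int) (t+1) v ((x, y) :: rest) sz mn mx
            = dfsLoop land (R : Int) (C : Int) t
                (markList v ((nbrs (x, y)).filter (fun n => okB land (R : Int) (C : Int) v n.1 n.2)))
                (((nbrs (x, y)).filter (fun n => okB land (R : Int) (C : Int) v n.1 n.2)).reverse ++ rest)
                (sz+1) (min mn y) (max mx y) := by
          simp only [dfsLoop]
          rw [hnb, hfold]
        rw [hstep, heq]
        simp only [List.length_cons, List.map_cons, List.foldl_cons, Prod.mk.injEq]
        push_cast
        exact ⟨by ring, trivial⟩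

-- ---- permutation glue ----

theorem foldl_comm_perm (f : Int → Int → Int) (hc : ∀ a b c, f (f a b) c = f (f a c) b)
    {l1 l2 : List Int} (h : l1.Perm l2) : ∀ b, l1.foldl f b = l2.foldl f b := by
  induction h with
  | nil => intro b; rfl
  | cons x h ih => intro b; simpa using ih (f b x)
  | swap x y l => intro b; simp only [List.foldl_cons]; rw [hc]
  | trans h1 h2 ih1 ih2 => intro b; rw [ih1, ih2]

-- start step: marking the ok start cell does not change what is reachable from it
theorem rtc_start (R C : Nat) (land : List (List Int)) (v : List (List Bool)) (p : Int × Int)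
    (hI : InvV R C v) (hok : okB land (R : Int) (C : Int) v p.1 p.2 = true) (r : Int × Int) :
    RTC land (R : Int) (C : Int) v p r ↔ RTC land (R : Int) (C : Int) (pvMark v p.1 p.2) p r := by
  obtain ⟨hb, _⟩ := okB_bounds _ _ _ _ _ _ hok
  constructor
  · intro h
    induction h with
    | refl => exact RTC.refl _
    | @tail q0 r0 h1 hmem hokr ih =>
      by_cases hrp : r0 = p
      · subst hrp; exact RTC.refl _
      · refine RTC.tail ih hmem ?_
        rw [okB_mark_ne R C land v p.1 p.2 r0.1 r0.2 hb.1 hb.2.2.1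
          (by simpa [Prod.ext_iff] using hrp)]
        exact hokr
  · intro h
    exact rtc_mono land (R : Int) (C : Int) v (pvMark v p.1 p.2)
      (fun a b hab => (okB_mark_mono R C land v p.1 p.2 a b hI hok hab).1) h

theorem bfsLoop_nil (land : List (List Int)) (rows cols : Int) (v : List (List Bool))
    (sz mn mx : Int) : ∀ fuel, bfsLoop land rows cols fuel v [] sz mn mx = (sz, mn, mx) := by
  intro fuel
  cases fuel <;> simp [bfsLoop]

-- ===== VERDICT (by name: the statement is the Claim_ definition above) =====
theorem bfs_spec : Claim_equal_bfs := by
  intro land visited i j _ hpre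
  show bfs land visited i j = bfs_alt land visited i j
  by_cases hok : okB land (land.length : Int) ((land.headD []).length : Int) visited i j = true
  · obtain ⟨-, hdisj⟩ := hpre
    obtain ⟨hb, hv⟩ := okB_bounds _ _ _ _ _ _ hok
    have hl : pvLget land i j ≠ 0 := by
      intro h0
      rw [show okB land (land.length : Int) ((land.headD []).length : Int) visited i j
        = (decide (0 ≤ i ∧ i < (land.length : Int) ∧ 0 ≤ j ∧ j < ((land.headD []).length : Int))
          && !pvVget visited i j && (pvLget land i j != 0)) from rfl, h0] at hok
      simp at hok
    have hRect : land.length ≤ visited.length ∧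
        (∀ row ∈ land, (land.headD []).length ≤ row.length) ∧
        (∀ row ∈ visited.take land.length, (land.headD []).length ≤ row.length) := by
      rcases hdisj with h | h | h
      · exact absurd hb h
      · exfalso
        obtain ⟨h1, h2, h3⟩ := h
        rcases h3 with h3 | ⟨h4, h5⟩
        · have h3' : pvVget visited i j = true := h3
          rw [hv] at h3'
          exact absurd h3' (by simp)
        · exact hl h5
      · exact h
    have hI : InvV land.length (land.headD []).length visited := by
      obtain ⟨h1, h2, h3⟩ := hRect
      refine ⟨h1, fun k hk => ?_⟩
      have hkv : k < visited.length := by omega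
      have hkt : k < (visited.take land.length).length := by
        simp only [List.length_take]
        omega
      have hmem : (visited.take land.length)[k] ∈ visited.take land.length :=
        List.getElem_mem hkt
      have hidx : (visited.take land.length)[k] = visited[k] := by
        simp [List.getElem_take]
      rw [hidx] at hmem
      have := h3 _ hmem
      rw [List.getD_eq_getElem?_getD, List.getElem?_eq_getElem hkv]
      simpa using this
    obtain ⟨L₁, hnd₁, hmem₁, heq₁⟩ := bfs_run land land.length (land.headD []).length
      (4 * (land.length * (land.headD []).length) + 1) visited [(i, j)] 0 j j hI
      (by have := Ucnt_le land.length (land.headD []).length visited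
          simp only [List.length_cons, List.length_nil]
          omega)
    have hI₁ := InvV_mark land.length (land.headD []).length visited i j hI
    have hUm := Ucnt_mark land.length (land.headD []).length land visited i j hI hok
    obtain ⟨L₂, hnd₂, hmem₂, heq₂⟩ := dfs_run land land.length (land.headD []).length
      (land.length * (land.headD []).length + 1) (pvMark visited i j) [(i, j)] 0 j j hI₁
      (by have := Ucnt_le land.length (land.headD []).length visited
          simp only [List.length_cons, List.length_nil]
          omega)
      (List.nodup_singleton _)
      (by intro p hp
          have hp' : p = (i, j) := by simpa using hp
          subst hp'
          exact pvVget_mark_self land.length (land.headD []).length visited i j hI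
            hb.1 hb.2.1 hb.2.2.1 hb.2.2.2)
    have hmemeq : ∀ r, r ∈ L₁ ↔ r ∈ L₂ := by
      intro r
      rw [hmem₁ r, hmem₂ r]
      constructor
      · rintro ⟨p0, hp0, hokp, hrtc⟩
        have hp' : p0 = (i, j) := by simpa using hp0
        subst hp'
        exact ⟨(i, j), List.mem_cons_self,
          (rtc_start land.length (land.headD []).length land visited (i, j) hI hok r).1 hrtc⟩
      · rintro ⟨p0, hp0, hrtc⟩
        have hp' : p0 = (i, j) := by simpa using hp0
        subst hp'
        exact ⟨(i, j), List.mem_cons_self, hok,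
          (rtc_start land.length (land.headD []).length land visited (i, j) hI hok r).2 hrtc⟩
    have hperm : L₁.Perm L₂ := (List.perm_ext_iff_of_nodup hnd₁ hnd₂).2 hmemeq
    have hlen : (L₁.length : Int) = (L₂.length : Int) := by rw [hperm.length_eq]
    have hmin := foldl_comm_perm min (fun a b c => min_right_comm a b c) (hperm.map Prod.snd) j
    have hmax := foldl_comm_perm max (fun a b c => max_right_comm a b c) (hperm.map Prod.snd) j
    unfold bfs bfs_alt
    rw [if_pos hok, heq₁, heq₂, hlen, hmin, hmax]
  · have halt : bfs_alt land visited i j = (0, j, j) := by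
      unfold bfs_alt
      rw [if_neg hok]
    rw [halt]
    unfold bfs
    simp only [bfsLoop]
    by_cases hbnd : 0 ≤ i ∧ i < (land.length : Int) ∧ 0 ≤ j ∧ j < ((land.headD []).length : Int)
    · have hskip : (pvVget visited i j || pvLget land i j == 0) = true := by
        by_contra hng
        have hsk : ¬(pvVget visited i j = true ∨ pvLget land i j = 0) := by simpa using hng
        have hv : pvVget visited i j = false := by
          cases h : pvVget visited i j
          · rfl
          · exact absurd (Or.inl h) hsk
        have hl0 : pvLget land i j ≠ 0 := fun h => hsk (Or.inr h)
        refine hok ?_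
        simp only [okB]
        rw [decide_eq_true hbnd]
        simp [hv, hl0]
      rw [if_neg (by simpa using hbnd), if_pos hskip, bfsLoop_nil]
    · rw [if_pos (by simpa using hbnd), bfsLoop_nil]
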